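-- pv_equiv track=rewrite | github.com/sashaaero/binarysearch-problems | problems/hard/circular_longest_increasing_subsequence.py | solve
-- ===== SOURCE A (Python) =====
-- from bisect import bisect_left
--
-- def solve(nums):
--     n = len(nums)
--     nums = nums + nums
--
--     def longest(i, j):
--         dp = []
--         for k in range(i, j):
--             x = nums[k]
--             j = bisect_left(dp, x)
--             if j >= len(dp):
--                 dp.append(x)
--             else:
--                 dp[j] = x
--         return len(dp)
--
--     return max(longest(i, i + n) for i in range(n))
-- ===== SOURCE B (Python) =====
-- def solve(nums):
--     n = len(nums)
--     doubled = nums + nums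
--     best = 0
--     for i in range(n):
--         pairs = []  # (value, length of longest increasing subseq of window ending here)
--         top = 0
--         for k in range(i, i + n):
--             x = doubled[k]
--             m = 0
--             for (v, l) in pairs:
--                 if v < x and l > m:
--                     m = l
--             pairs.append((x, m + 1))
--             if m + 1 > top:
--                 top = m + 1
--         if top > best:
--             best = top
--     return best
-- ===== Notes on version B (the rewrite author's own statement) =====
-- stated objective: alternative
-- what changed: The inner patience-sorting LIS (bisect_left on a tails list) is replaced by the classic quadratic DP that stores, for each window position, the pair (value, best increasing-subsequence length ending there) and keeps a running maximum; the outer loop over rotations stays.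
import Mathlib
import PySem

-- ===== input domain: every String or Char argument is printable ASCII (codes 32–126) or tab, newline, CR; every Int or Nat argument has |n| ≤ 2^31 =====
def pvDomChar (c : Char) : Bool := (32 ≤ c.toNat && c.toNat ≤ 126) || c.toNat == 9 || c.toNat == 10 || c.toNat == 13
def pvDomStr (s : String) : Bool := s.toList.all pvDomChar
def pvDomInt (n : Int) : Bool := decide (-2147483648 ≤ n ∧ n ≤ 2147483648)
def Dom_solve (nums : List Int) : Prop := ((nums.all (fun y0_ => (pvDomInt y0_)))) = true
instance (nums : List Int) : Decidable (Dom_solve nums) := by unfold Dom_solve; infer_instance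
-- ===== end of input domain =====

-- B replaces the inner patience-sorting LIS with the classic quadratic DP over (value, length) pairs: a
-- different algorithm of similar size (alternative, not faster); return-value equivalence only.

-- ===== PORT A =====
-- one iteration of A's inner loop: x = nums[k]; j = bisect_left(dp, x); append or overwrite
def patStep (dp : List Int) (x : Int) : List Int :=
  let j := PySem.List.bisectLeft dp x
  if j ≥ dp.length then dp ++ [x] else dp.set j x

-- A's loop body reads nums[k]; k is always in range, so pyGetD's default is unreachable
def aStep (nums2 : List Int) (dp : List Int) (k : Int) : List Int :=
  patStep dp (PySem.List.pyGetD nums2 k 0)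

-- A's helper longest(i, j)
def longestA (nums2 : List Int) (i j : Int) : Int :=
  (((PySem.List.pyRange i j 1).foldl (aStep nums2) []).length : Int)

def solve (nums : List Int) : Int :=
  let n : Int := (nums.length : Int)
  let nums2 := nums ++ nums
  -- max(generator); Python raises ValueError on empty nums — excluded by Pre_solve, so getD 0 is unreachable
  (PySem.List.max? ((PySem.List.pyRange 0 n 1).map (fun i => longestA nums2 i (i + n))) (fun y => y)).getD 0

-- ===== PORT B =====
-- B's innermost scan: m = 0; for (v, l) in pairs: if v < x and l > m: m = l
def bScanMax (pairs : List (Int × Int)) (x : Int) : Int :=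
  pairs.foldl (fun m p => if p.1 < x ∧ p.2 > m then p.2 else m) 0

-- B's window-loop body: state = (pairs, top)
def bStep (doubled : List Int) (st : List (Int × Int) × Int) (k : Int) : List (Int × Int) × Int :=
  let x := PySem.List.pyGetD doubled k 0
  let m := bScanMax st.1 x
  (st.1 ++ [(x, m + 1)], if m + 1 > st.2 then m + 1 else st.2)

def solve_alt (nums : List Int) : Int :=
  let n : Int := (nums.length : Int)
  let doubled := nums ++ nums
  (PySem.List.pyRange 0 n 1).foldl (fun best i =>
    let st := (PySem.List.pyRange i (i + n) 1).foldl (bStep doubled) ([], 0)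
    if st.2 > best then st.2 else best) 0

-- ===== PRECONDITION & SPEC =====
-- Python A raises ValueError (max of an empty generator) exactly when nums is empty
def Pre_solve (nums : List Int) : Prop := nums ≠ []
instance (nums : List Int) : Decidable (Pre_solve nums) := by unfold Pre_solve; infer_instance
def pvWitness_solve : List Int := [2, 1, 3]


def Spec_solve (nums : List Int) (out : Int) : Prop := out = solve_alt nums
instance (nums : List Int) (out : Int) : Decidable (Spec_solve nums out) := by unfold Spec_solve; infer_instance

-- ===== CLAIM (what is proved, stated in full; the proofs are below) =====
def Claim_equal_solve : Prop := ∀ (nums : List Int), Dom_solve nums → Pre_solve nums → Spec_solve nums (solve nums)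

-- ===== LEMMAS AND PROOFS =====

-- The invariant tying A's patience tails list dp to B's (value, L) pairs and running max:
-- dp is strictly increasing, its length is B's running max, every L lies in [1, top],
-- and dp[t] is the minimum value carrying L = t+1, attained by some pair.
def PatInv (dp : List Int) (pairs : List (Int × Int)) (top : Int) : Prop :=
  List.Pairwise (· < ·) dp ∧
  (dp.length : Int) = top ∧
  (∀ p ∈ pairs, 1 ≤ p.2 ∧ p.2 ≤ top) ∧
  (∀ t (h : t < dp.length), (dp[t], (t : Int) + 1) ∈ pairs ∧
      ∀ p ∈ pairs, p.2 = (t : Int) + 1 → dp[t] ≤ p.1)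

-- characterisation of B's innermost scan (fold with generalized accumulator)
theorem bscan_aux (x : Int) (pairs : List (Int × Int)) : ∀ (m0 : Int),
    m0 ≤ pairs.foldl (fun m p => if p.1 < x ∧ p.2 > m then p.2 else m) m0 ∧
    (∀ p ∈ pairs, p.1 < x → p.2 ≤ pairs.foldl (fun m p => if p.1 < x ∧ p.2 > m then p.2 else m) m0) ∧
    (pairs.foldl (fun m p => if p.1 < x ∧ p.2 > m then p.2 else m) m0 = m0 ∨
      ∃ p ∈ pairs, p.1 < x ∧ p.2 = pairs.foldl (fun m p => if p.1 < x ∧ p.2 > m then p.2 else m) m0) := by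
  induction pairs with
  | nil => intro m0; simp
  | cons q rest ih =>
    intro m0
    simp only [List.foldl_cons]
    obtain ⟨ih1, ih2, ih3⟩ := ih (if q.1 < x ∧ q.2 > m0 then q.2 else m0)
    refine ⟨?_, ?_, ?_⟩
    · have h : m0 ≤ (if q.1 < x ∧ q.2 > m0 then q.2 else m0) := by split_ifs with h <;> omega
      exact le_trans h ih1
    · intro p hp hpx
      rcases List.mem_cons.mp hp with hp | hp
      · subst hp
        by_cases h : p.2 > m0
        · have hc : (if p.1 < x ∧ p.2 > m0 then p.2 else m0) = p.2 := if_pos ⟨hpx, h⟩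
          rw [hc] at ih1 ⊢
          exact ih1
        · have h2 : p.2 ≤ (if p.1 < x ∧ p.2 > m0 then p.2 else m0) := by split_ifs with h3 <;> omega
          exact le_trans h2 ih1
      · exact ih2 p hp hpx
    · rcases ih3 with h | ⟨p, hp, hpx, hpe⟩
      · rw [h]
        split_ifs with h2
        · exact Or.inr ⟨q, by simp, h2.1, rfl⟩
        · exact Or.inl rfl
      · exact Or.inr ⟨p, by simp [hp], hpx, hpe⟩

theorem PatInv_step (dp : List Int) (pairs : List (Int × Int)) (top x : Int) (hInv : PatInv dp pairs top) :
    PatInv (patStep dp x) (pairs ++ [(x, bScanMax pairs x + 1)])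
        (if bScanMax pairs x + 1 > top then bScanMax pairs x + 1 else top) := by
  obtain ⟨h1, h2, h3, h4⟩ := hInv
  obtain ⟨ha1, ha2, ha3⟩ := bscan_aux x pairs 0
  rw [show pairs.foldl (fun m p => if p.1 < x ∧ p.2 > m then p.2 else m) 0 = bScanMax pairs x from rfl] at ha1 ha2 ha3
  set m := bScanMax pairs x with hm
  have hm0 : 0 ≤ m := ha1
  have hmle : m ≤ top := by
    rcases ha3 with h | ⟨p, hp, _, hpe⟩
    · omega
    · have := (h3 p hp).2; omega
  set Mn := m.toNat with hMn
  have hMn' : (Mn : Int) = m := Int.toNat_of_nonneg hm0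
  have hMnlen : Mn ≤ dp.length := by omega
  -- everything left of the insertion point is < x
  have hA : ∀ t (ht : t < dp.length), t < Mn → dp[t] < x := by
    intro t ht htM
    have hm1 : 1 ≤ m := by omega
    rcases ha3 with h | ⟨p, hp, hpx, hpe⟩
    · omega
    · have ht0 : Mn - 1 < dp.length := by omega
      have hd0 : dp[Mn - 1] ≤ p.1 := by
        refine (h4 (Mn - 1) ht0).2 p hp ?_
        push_cast [Nat.sub_add_cancel (by omega : 1 ≤ Mn)] at *
        omega
      have hd0x : dp[Mn - 1] < x := lt_of_le_of_lt hd0 hpx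
      rcases eq_or_lt_of_le (by omega : t ≤ Mn - 1) with he | hl
      · simpa [he] using hd0x
      · exact lt_trans ((List.pairwise_iff_getElem.mp h1) t (Mn - 1) ht ht0 hl) hd0x
  -- the element at the insertion point (if any) is ≥ x
  have hB : ∀ (hlt : Mn < dp.length), x ≤ dp[Mn] := by
    intro hlt
    by_contra hcon
    rw [Int.not_le] at hcon
    have hmem := (h4 Mn hlt).1
    have := ha2 _ hmem hcon
    omega
  -- bisect_left lands exactly at Mn
  have hbis : PySem.List.bisectLeft dp x = Mn := by
    obtain ⟨s1, s2, s3⟩ := PySem.List.bisectLeft_spec dp x (h1.imp le_of_lt)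
    rcases lt_trichotomy (PySem.List.bisectLeft dp x) Mn with hlt | heq | hgt
    · have hr : PySem.List.bisectLeft dp x < dp.length := by omega
      have := s3 _ hr le_rfl
      have := hA _ hr hlt
      omega
    · exact heq
    · have hr : Mn < dp.length := by omega
      have := s2 _ hr hgt
      have := hB hr
      omega
  have hps : patStep dp x = if Mn ≥ dp.length then dp ++ [x] else dp.set Mn x := by
    simp only [patStep, hbis]
  by_cases hc : Mn ≥ dp.length
  · -- append case: Mn = dp.length, top grows to m + 1
    have hlen : Mn = dp.length := le_antisymm hMnlen hc
    have htopm : top = m := by omega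
    have htop' : (if m + 1 > top then m + 1 else top) = m + 1 := if_pos (by omega)
    rw [hps, if_pos hc, htop']
    refine ⟨?_, ?_, ?_, ?_⟩
    · rw [List.pairwise_append]
      refine ⟨h1, List.pairwise_singleton _ _, ?_⟩
      intro a ha b hb
      rw [List.mem_singleton] at hb
      subst hb
      obtain ⟨t, ht, rfl⟩ := List.mem_iff_getElem.mp ha
      exact hA t ht (by omega)
    · simp only [List.length_append, List.length_singleton]
      push_cast
      omega
    · intro p hp
      rcases List.mem_append.mp hp with hp | hp
      · have := h3 p hp; omega
      · rw [List.mem_singleton] at hp; subst hp; refine ⟨by simp; omega, by simp⟩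
    · intro t ht
      simp only [List.length_append, List.length_singleton] at ht
      by_cases htl : t < dp.length
      · have hgt : (dp ++ [x])[t] = dp[t] := List.getElem_append_left htl
        rw [hgt]
        refine ⟨List.mem_append.mpr (Or.inl (h4 t htl).1), ?_⟩
        intro p hp hpe
        rcases List.mem_append.mp hp with hp | hp
        · exact (h4 t htl).2 p hp hpe
        · rw [List.mem_singleton] at hp; subst hp
          exfalso
          simp only at hpe
          omega
      · have hteq : t = dp.length := by omega
        subst hteq
        have hgt : (dp ++ [x])[dp.length] = x := by
          rw [List.getElem_append_right (le_refl dp.length)]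
          simp
        rw [hgt]
        constructor
        · refine List.mem_append.mpr (Or.inr ?_)
          rw [List.mem_singleton]
          have he : ((dp.length : Int)) + 1 = m + 1 := by omega
          rw [he]
        · intro p hp hpe
          rcases List.mem_append.mp hp with hp | hp
          · exfalso
            have := (h3 p hp).2
            omega
          · rw [List.mem_singleton] at hp; subst hp
            exact le_refl x
  · -- overwrite case: Mn < dp.length, top unchanged
    rw [Nat.not_le] at hc
    have htop' : (if m + 1 > top then m + 1 else top) = top := if_neg (by omega)
    rw [hps, if_neg (by omega), htop']
    have hxle : x ≤ dp[Mn] := hB hc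
    refine ⟨?_, ?_, ?_, ?_⟩
    · rw [List.pairwise_iff_getElem]
      intro i j hi hj hij
      rw [List.length_set] at hi hj
      have hgi := List.getElem_set (l := dp) (i := Mn) (a := x) (j := i) (h := by rwa [List.length_set])
      have hgj := List.getElem_set (l := dp) (i := Mn) (a := x) (j := j) (h := by rwa [List.length_set])
      rw [hgi, hgj]
      have hpw := List.pairwise_iff_getElem.mp h1
      split_ifs with e1 e2 e2
      · omega
      · subst e1
        exact lt_of_le_of_lt hxle (hpw _ _ hc hj hij)
      · subst e2
        exact hA i hi hij
      · exact hpw i j hi hj hij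
    · rw [List.length_set]; omega
    · intro p hp
      rcases List.mem_append.mp hp with hp | hp
      · exact h3 p hp
      · rw [List.mem_singleton] at hp; subst hp; refine ⟨by simp; omega, by simp; omega⟩
    · intro t ht
      rw [List.length_set] at ht
      have hgt := List.getElem_set (l := dp) (i := Mn) (a := x) (j := t) (h := by rwa [List.length_set])
      by_cases hte : t = Mn
      · subst hte
        rw [hgt, if_pos rfl]
        constructor
        · refine List.mem_append.mpr (Or.inr ?_)
          rw [List.mem_singleton]
          have he : ((Mn : Int)) + 1 = m + 1 := by omega
          rw [he]
        · intro p hp hpe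
          rcases List.mem_append.mp hp with hp | hp
          · exact le_trans hxle ((h4 Mn ht).2 p hp hpe)
          · rw [List.mem_singleton] at hp; subst hp
            exact le_refl x
      · rw [hgt, if_neg (fun h => hte h.symm)]
        refine ⟨List.mem_append.mpr (Or.inl (h4 t ht).1), ?_⟩
        intro p hp hpe
        rcases List.mem_append.mp hp with hp | hp
        · exact (h4 t ht).2 p hp hpe
        · rw [List.mem_singleton] at hp; subst hp
          exfalso
          simp only at hpe
          omega

-- starting states satisfy the invariant
theorem PatInv_init : PatInv [] [] 0 := by
  refine ⟨List.Pairwise.nil, by simp, by simp, by simp⟩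

-- lockstep: folding A's step and B's step over the same index list preserves the invariant
theorem lockstep (xs2 : List Int) (ks : List Int) : ∀ dp pairs top, PatInv dp pairs top →
    PatInv (ks.foldl (aStep xs2) dp)
        (ks.foldl (bStep xs2) (pairs, top)).1 (ks.foldl (bStep xs2) (pairs, top)).2 := by
  induction ks with
  | nil => intro dp pairs top h; simpa using h
  | cons k rest ih =>
    intro dp pairs top h
    simp only [List.foldl_cons]
    have := PatInv_step dp pairs top (PySem.List.pyGetD xs2 k 0) h
    exact ih _ _ _ this

-- per-window agreement: A's len(dp) equals B's top
theorem window_eq (xs2 : List Int) (ks : List Int) :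
    ((ks.foldl (aStep xs2) []).length : Int) = (ks.foldl (bStep xs2) (([], 0) : List (Int × Int) × Int)).2 :=
  (lockstep xs2 ks [] [] 0 PatInv_init).2.1

-- running max with "if v > b then v else b" is foldl max
theorem foldl_ifmax_eq_max (t : List Int) : ∀ (a : Int),
    t.foldl (fun b v => if v > b then v else b) a = t.foldl max a := by
  induction t with
  | nil => intro a; rfl
  | cons v rest ih =>
    intro a
    simp only [List.foldl_cons]
    rw [ih]
    congr 1
    by_cases h : v > a
    · rw [if_pos h, max_eq_right (le_of_lt h)]
    · rw [if_neg h, max_eq_left (by omega)]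

-- B's running-max loop computes Python's max() of the window values (all nonnegative)
theorem foldmax_eq_max? (vs : List Int) (hnn : ∀ v ∈ vs, 0 ≤ v) :
    vs.foldl (fun b v => if v > b then v else b) 0 = (PySem.List.max? vs (fun y => y)).getD 0 := by
  cases vs with
  | nil => rfl
  | cons v t =>
    rw [PySem.List.max?_id_cons]
    simp only [List.foldl_cons, Option.getD_some]
    have hv : (0 : Int) ≤ v := hnn v (by simp)
    have h0 : (if v > (0 : Int) then v else 0) = v := by split_ifs with h <;> omega
    rw [h0, foldl_ifmax_eq_max]

-- the two programs agree on every input (A's port returns 0 where Python A would raise)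
theorem outer_eq (nums : List Int) : solve nums = solve_alt nums := by
  unfold solve solve_alt
  dsimp only
  set n : Int := (nums.length : Int) with hn
  set ds := nums ++ nums with hds
  set R := PySem.List.pyRange 0 n 1 with hR
  set g : Int → Int := fun i =>
    ((PySem.List.pyRange i (i + n) 1).foldl (bStep ds) (([], 0) : List (Int × Int) × Int)).2 with hg
  have hfg : (fun i => longestA ds i (i + n)) = g := by
    funext i
    simp only [hg, longestA]
    exact window_eq ds _
  have hfold : R.foldl (fun best i =>
      let st := (PySem.List.pyRange i (i + n) 1).foldl (bStep ds) (([], 0) : List (Int × Int) × Int)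
      if st.2 > best then st.2 else best) 0
      = (R.map g).foldl (fun b v => if v > b then v else b) 0 := by
    rw [List.foldl_map]
  rw [hfg, hfold, foldmax_eq_max?]
  intro v hv
  obtain ⟨i, hi, rfl⟩ := List.mem_map.mp hv
  simp only [hg]
  rw [← window_eq]
  exact Int.natCast_nonneg _

-- ===== VERDICT (by name: the statement is the Claim_ definition above) =====
theorem solve_spec : Claim_equal_solve := by
  intro nums _ _
  unfold Spec_solve
  exact outer_eq nums
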